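-- pv_equiv track=rewrite | github.com/robjatho/codewars | python/break_camel_case/break_camel_case.py | solution
-- ===== SOURCE A (Python) =====
-- def solution(s):
--     words = ''
--     for letter in range(0,len(s)):
--         if s[letter].isupper() and letter > 0:
--             words += ' ' + s[letter]
--         else:
--             words += s[letter]
--     return words
-- ===== SOURCE B (Python) =====
-- def solution(s):
--     cuts = [i for i in range(1, len(s)) if s[i].isupper()]
--     bounds = [0] + cuts + [len(s)]
--     return ' '.join(s[a:b] for a, b in zip(bounds, bounds[1:]))
-- ===== Notes on version B (the rewrite author's own statement) =====
-- stated objective: alternative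
-- what changed: Instead of a per-character loop that conditionally prefixes a space, B first computes the list of cut indices (non-initial uppercase positions), turns it into segment boundaries, slices the string into words and joins them with spaces.
import Mathlib
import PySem

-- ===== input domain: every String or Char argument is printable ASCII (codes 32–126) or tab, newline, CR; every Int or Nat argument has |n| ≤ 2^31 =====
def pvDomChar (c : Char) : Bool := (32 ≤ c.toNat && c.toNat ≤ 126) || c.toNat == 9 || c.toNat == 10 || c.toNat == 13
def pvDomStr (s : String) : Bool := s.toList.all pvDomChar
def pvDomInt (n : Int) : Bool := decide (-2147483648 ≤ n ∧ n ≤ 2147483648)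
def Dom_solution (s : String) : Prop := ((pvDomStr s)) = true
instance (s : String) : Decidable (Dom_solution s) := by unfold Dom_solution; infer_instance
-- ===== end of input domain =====

-- B replaces A's per-character loop (conditional space prefix, += accumulator) by a staged
-- algorithm: compute the cut indices (non-initial uppercase positions), slice the string
-- into segments at those cuts, and join the segments with spaces.


-- ===== PORT A =====
-- words = ''; for letter in range(0, len(s)): if s[letter].isupper() and letter > 0: words += ' ' + s[letter] else: words += s[letter]
-- s[letter] is always in range, so pyGetD's default is never read.
def solution (s : String) : String :=
  String.mk ((PySem.List.pyRange 0 (PySem.Str.len s) 1).foldl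
    (fun words letter =>
      if PySem.Chars.isupper (PySem.List.pyGetD s.toList letter ' ') && decide (letter > 0)
      then words ++ [' ', PySem.List.pyGetD s.toList letter ' ']
      else words ++ [PySem.List.pyGetD s.toList letter ' ']) [])

-- ===== PORT B =====
-- cuts = [i for i in range(1, len(s)) if s[i].isupper()]
-- bounds = [0] + cuts + [len(s)]
-- return ' '.join(s[a:b] for a, b in zip(bounds, bounds[1:]))
def solution_alt (s : String) : String :=
  let l := s.toList
  let cuts := (PySem.List.pyRange 1 (PySem.Str.len s) 1).filter
    (fun i => PySem.Chars.isupper (PySem.List.pyGetD l i ' '))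
  let bounds : List Int := 0 :: cuts ++ [PySem.Str.len s]
  String.mk (PySem.Chars.join [' ']
    ((List.zip bounds (PySem.List.slice bounds (some 1) none)).map
      (fun pr => PySem.List.slice l (some pr.1) (some pr.2))))

-- ===== PRECONDITION & SPEC =====
def Spec_solution (s : String) (out : String) : Prop := out = solution_alt s
instance (s : String) (out : String) : Decidable (Spec_solution s out) := by unfold Spec_solution; infer_instance

-- ===== CLAIM (what is proved, stated in full; the proofs are below) =====
def Claim_equal_solution : Prop := ∀ (s : String), Dom_solution s → Spec_solution s (solution s)

-- ===== LEMMAS AND PROOFS =====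

-- proof-side helpers: the per-character emission and the common canonical form
def pvF (c : Char) : List Char := if PySem.Chars.isupper c then [' ', c] else [c]
def pvT (l : List Char) : List Char := l.take 1 ++ l.tail.flatMap pvF

theorem pvFlatMap_id (xs : List Char) (h : ∀ c ∈ xs, PySem.Chars.isupper c = false) :
    xs.flatMap pvF = xs := by
  induction xs with
  | nil => rfl
  | cons c t ih =>
    have hc : PySem.Chars.isupper c = false := h c (by simp)
    simp [List.flatMap_cons, pvF, hc, ih (fun d hd => h d (by simp [hd]))]

-- filter of an increasing integer range: empty / head characterisation
theorem pvFilter_pyRange_nil (p : Int → Bool) (u v : Int)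
    (h : (PySem.List.pyRange u v 1).filter p = []) :
    ∀ j, u ≤ j → j < v → p j = false := by
  intro j h1 h2
  have := List.filter_eq_nil_iff.mp h j (PySem.List.mem_pyRange_one.mpr ⟨h1, h2⟩)
  simpa using this

theorem pvFilter_pyRange_cons (p : Int → Bool) :
    ∀ (n : ℕ) (u v b : Int) (tl : List Int), (v - u).toNat ≤ n →
    (PySem.List.pyRange u v 1).filter p = b :: tl →
    u ≤ b ∧ b < v ∧ p b = true ∧ (∀ j, u ≤ j → j < b → p j = false) ∧
      tl = (PySem.List.pyRange (b+1) v 1).filter p := by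
  intro n
  induction n with
  | zero =>
    intro u v b tl hle h
    have hb : b ∈ (PySem.List.pyRange u v 1).filter p := by rw [h]; simp
    have := PySem.List.mem_pyRange_one.mp (List.mem_of_mem_filter hb)
    omega
  | succ n ih =>
    intro u v b tl hle h
    have huv : u < v := by
      by_contra hc
      rw [PySem.List.pyRange_one_eq_nil (by omega)] at h; simp at h
    rw [PySem.List.pyRange_one_cons huv] at h
    by_cases hp : p u = true
    · rw [List.filter_cons_of_pos hp] at h
      injection h with hb htl
      subst hb
      exact ⟨le_refl u, huv, hp, fun j h1 h2 => by omega, htl.symm⟩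
    · rw [List.filter_cons_of_neg (by simpa using hp)] at h
      obtain ⟨h1, h2, h3, h4, h5⟩ := ih (u+1) v b tl (by omega) h
      refine ⟨by omega, h2, h3, fun j hj1 hj2 => ?_, h5⟩
      rcases eq_or_lt_of_le hj1 with rfl | hlt
      · simpa using hp
      · exact h4 j (by omega) hj2

-- core lemma: joining the slices at the cut indices after position a yields the
-- canonical per-character form on the suffix from a
theorem pvJoinSegs (l : List Char) :
    ∀ (n : ℕ) (a : Int), 0 ≤ a → a < (l.length : Int) → ((l.length : Int) - a).toNat ≤ n →
    PySem.Chars.join [' ']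
      ((List.zip (a :: (PySem.List.pyRange (a+1) (l.length : Int) 1).filter
                    (fun i => PySem.Chars.isupper (PySem.List.pyGetD l i ' ')) ++ [(l.length : Int)])
                 ((PySem.List.pyRange (a+1) (l.length : Int) 1).filter
                    (fun i => PySem.Chars.isupper (PySem.List.pyGetD l i ' ')) ++ [(l.length : Int)])).map
        (fun pr => PySem.List.slice l (some pr.1) (some pr.2)))
    = (l.drop a.toNat).take 1 ++ (l.drop (a.toNat + 1)).flatMap pvF := by
  intro n
  induction n with
  | zero => intro a h0 hN hle; omega
  | succ n ih =>
    intro a h0 hN hle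
    have hA : a.toNat < l.length := by omega
    have hdropA : l.drop a.toNat = l[a.toNat] :: l.drop (a.toNat + 1) :=
      List.drop_eq_getElem_cons hA
    rcases hfil : (PySem.List.pyRange (a+1) (l.length : Int) 1).filter
        (fun i => PySem.Chars.isupper (PySem.List.pyGetD l i ' ')) with _ | ⟨b, tl⟩
    · -- no cut after a: one single segment to the end
      simp only [List.nil_append, List.cons_append, List.zip_cons_cons,
        List.zip_nil_right, List.map_cons, List.map_nil, PySem.Chars.join_singleton]
      have hflat : (l.drop (a.toNat + 1)).flatMap pvF = l.drop (a.toNat + 1) := by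
        apply pvFlatMap_id
        intro c hc
        obtain ⟨k, hk, hck⟩ := List.mem_iff_getElem.mp hc
        have hk' : a.toNat + 1 + k < l.length := by
          simp [List.length_drop] at hk; omega
        have hj := pvFilter_pyRange_nil _ (a+1) (l.length : Int) hfil
          ((a.toNat + 1 + k : ℕ) : Int) (by omega) (by push_cast; omega)
        rw [PySem.List.pyGetD_eq_getElem _ _ (by omega) (by push_cast; omega)] at hj
        simp only [Int.toNat_natCast] at hj
        rw [← hck, List.getElem_drop]
        simpa using hj
      rw [PySem.List.slice_toNat l h0 (by omega), hflat,
        List.take_of_length_le (by simp only [List.length_drop]; omega), hdropA]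
      simp
    · -- first cut at b
      obtain ⟨hab, hbN, hpb, hmin, htl⟩ :=
        pvFilter_pyRange_cons _ (n+1) (a+1) (l.length : Int) b tl (by omega) hfil
      have hb0 : 0 ≤ b := by omega
      have hAB : a.toNat < b.toNat := by omega
      have hB : b.toNat < l.length := by omega
      have hres := ih b hb0 hbN (by omega)
      rw [← htl] at hres
      obtain ⟨q, qs, hqq⟩ := List.exists_cons_of_ne_nil (show tl ++ [(l.length : Int)] ≠ [] by simp)
      simp only [List.cons_append, hqq, List.zip_cons_cons, List.map_cons] at hres ⊢
      rw [PySem.Chars.join_cons_cons, hres]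
      -- now pure list algebra on drops/takes
      have hdropB : l.drop b.toNat = l[b.toNat] :: l.drop (b.toNat + 1) :=
        List.drop_eq_getElem_cons hB
      have hupB : PySem.Chars.isupper l[b.toNat] = true := by
        have h' := hpb
        rw [PySem.List.pyGetD_eq_getElem _ _ hb0 (by omega)] at h'
        exact h'
      have hdd : (l.drop (a.toNat + 1)).drop (b.toNat - a.toNat - 1) = l.drop b.toNat := by
        rw [List.drop_drop]; congr 1; omega
      have hsplit : l.drop (a.toNat + 1)
          = (l.drop (a.toNat + 1)).take (b.toNat - a.toNat - 1) ++ l.drop b.toNat := by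
        conv_lhs => rw [← List.take_append_drop (b.toNat - a.toNat - 1) (l.drop (a.toNat + 1))]
        rw [hdd]
      have hmid : ((l.drop (a.toNat + 1)).take (b.toNat - a.toNat - 1)).flatMap pvF
          = (l.drop (a.toNat + 1)).take (b.toNat - a.toNat - 1) := by
        apply pvFlatMap_id
        intro c hc
        obtain ⟨k, hk, hck⟩ := List.mem_iff_getElem.mp hc
        have hkb : k < b.toNat - a.toNat - 1 := by
          simp [List.length_take] at hk; omega
        have hk' : a.toNat + 1 + k < l.length := by omega
        have hj := hmin ((a.toNat + 1 + k : ℕ) : Int) (by omega) (by push_cast; omega)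
        rw [PySem.List.pyGetD_eq_getElem _ _ (by omega) (by push_cast; omega)] at hj
        simp only [Int.toNat_natCast] at hj
        rw [← hck, List.getElem_take, List.getElem_drop]
        simpa using hj
      have hBA : b.toNat - a.toNat = (b.toNat - a.toNat - 1) + 1 := by omega
      rw [PySem.List.slice_toNat l h0 hb0]
      conv_rhs => rw [hdropA, hsplit, List.flatMap_append, hmid, hdropB, List.flatMap_cons]
      rw [hdropA, hdropB, hBA, List.take_succ_cons]
      simp [pvF, hupB]
      rw [show List.take 1 (List.drop b.toNat l) = [l[b.toNat]] from by rw [hdropB]; rfl]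
      rfl

-- A's foldl equals the canonical per-character form (slice phrasing)
theorem solution_lists_eq (l : List Char) :
    (PySem.List.pyRange 0 (l.length : Int) 1).foldl
      (fun words letter =>
        if PySem.Chars.isupper (PySem.List.pyGetD l letter ' ') && decide (letter > 0)
        then words ++ [' ', PySem.List.pyGetD l letter ' ']
        else words ++ [PySem.List.pyGetD l letter ' ']) [] =
    PySem.List.slice l none (some 1) ++
      (PySem.List.slice l (some 1) none).flatMap
        (fun c => if PySem.Chars.isupper c then [' ', c] else [c]) := by
  cases l with
  | nil => simp [PySem.List.slice]
  | cons c rest =>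
    have h01 : PySem.List.pyRange 0 1 1 = [0] := by decide
    rw [PySem.List.pyRange_one_append 0 1 ((c :: rest).length : Int) (by omega)
          (by simp), h01]
    simp only [List.foldl_append, List.foldl_cons, List.foldl_nil]
    have h0 : (PySem.List.pyGetD (c :: rest) (0 : Int) ' ') = c := by
      simp [PySem.List.pyGetD]
    rw [show (if (PySem.Chars.isupper (PySem.List.pyGetD (c :: rest) 0 ' ') && decide ((0:Int) > 0)) = true then
          ([] : List Char) ++ [' ', PySem.List.pyGetD (c :: rest) 0 ' ']
        else [] ++ [PySem.List.pyGetD (c :: rest) 0 ' ']) = [c] from by simp [h0]]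
    rw [PySem.List.foldl_congr_mem _ _
        (fun (acc : List Char) (j : Int) => acc ++
          (if PySem.Chars.isupper (PySem.List.pyGetD (c :: rest) j ' ')
           then [' ', PySem.List.pyGetD (c :: rest) j ' ']
           else [PySem.List.pyGetD (c :: rest) j ' '])) _
        (by
          intro acc x hx
          have hx1 : 1 ≤ x := (PySem.List.mem_pyRange_one.mp hx).1
          have hd : decide (x > 0) = true := by simp; omega
          simp only [hd, Bool.and_true]
          split <;> rfl)]
    rw [PySem.List.foldl_pyRange_pyGetD' (c :: rest) ' '
        (fun acc ch => acc ++ (if PySem.Chars.isupper ch then [' ', ch] else [ch]))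
        [c] (a := 1) (by omega)]
    rw [PySem.List.foldl_append_eq_flatMap]
    simp [PySem.List.slice]

theorem pvA_eq (s : String) : solution s = String.mk (pvT s.toList) := by
  unfold solution
  rw [PySem.Str.len_eq, solution_lists_eq]
  congr 1
  simp [pysem, pvT]
  rfl

theorem pvAltList (l : List Char) :
    PySem.Chars.join [' ']
      ((List.zip (0 :: (PySem.List.pyRange 1 (l.length : Int) 1).filter
                    (fun i => PySem.Chars.isupper (PySem.List.pyGetD l i ' ')) ++ [(l.length : Int)])
                 (PySem.List.slice (0 :: (PySem.List.pyRange 1 (l.length : Int) 1).filter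
                    (fun i => PySem.Chars.isupper (PySem.List.pyGetD l i ' ')) ++ [(l.length : Int)])
                   (some 1) none)).map
        (fun pr => PySem.List.slice l (some pr.1) (some pr.2)))
    = pvT l := by
  rw [PySem.List.slice_from_one]
  cases l with
  | nil => rfl
  | cons c rest =>
    have h := pvJoinSegs (c :: rest) ((c :: rest).length) 0 (by norm_num) (by simp) (by simp)
    simp only [show (0:Int) + 1 = 1 from by norm_num, Int.toNat_zero, List.drop_zero,
      Nat.zero_add, List.drop_one] at h
    simpa [pvT] using h

theorem pvAlt_eq (s : String) : solution_alt s = String.mk (pvT s.toList) := by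
  unfold solution_alt
  dsimp only
  rw [PySem.Str.len_eq]
  exact congrArg String.mk (pvAltList s.toList)

-- ===== VERDICT (by name: the statement is the Claim_ definition above) =====
theorem solution_spec : Claim_equal_solution := by
  intro s _
  unfold Spec_solution
  rw [pvA_eq, pvAlt_eq]
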